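-- pv_equiv track=rewrite | github.com/mycodemanager/repo-context-engine | src/egce/spec.py | _parse_spec_header_from_content
-- ===== SOURCE A (Python) =====
-- def _parse_spec_header_from_content(content: str) -> dict:
--     info = {"id": "", "title": "", "status": ""}
--     for line in content.splitlines()[:20]:
--         if line.startswith(" ") or line.startswith("\t"):
--             continue
--         for key in ("id", "title", "status"):
--             if line.startswith(f"{key}:"):
--                 info[key] = line[len(key) + 1:].strip().strip('"').strip("'")
--     return info
-- ===== SOURCE B (Python) =====
-- def _parse_spec_header_from_content(content: str) -> dict:
--     lines = content.splitlines()[:20]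
--     info = {}
--     for key in ("id", "title", "status"):
--         info[key] = ""
--         for line in reversed(lines):
--             if line.startswith(" ") or line.startswith("\t"):
--                 continue
--             if line.startswith(key + ":"):
--                 info[key] = line[len(key) + 1:].strip().strip('"').strip("'")
--                 break
--     return info
-- ===== Notes on version B (the rewrite author's own statement) =====
-- stated objective: alternative
-- what changed: Inverts the loop nesting: instead of A's single forward pass over lines that probes three key prefixes and overwrites earlier hits, B runs one staged pass per key that scans the 20-line window in reverse and stops at the first (i.e. last) matching line.
import Mathlib
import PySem

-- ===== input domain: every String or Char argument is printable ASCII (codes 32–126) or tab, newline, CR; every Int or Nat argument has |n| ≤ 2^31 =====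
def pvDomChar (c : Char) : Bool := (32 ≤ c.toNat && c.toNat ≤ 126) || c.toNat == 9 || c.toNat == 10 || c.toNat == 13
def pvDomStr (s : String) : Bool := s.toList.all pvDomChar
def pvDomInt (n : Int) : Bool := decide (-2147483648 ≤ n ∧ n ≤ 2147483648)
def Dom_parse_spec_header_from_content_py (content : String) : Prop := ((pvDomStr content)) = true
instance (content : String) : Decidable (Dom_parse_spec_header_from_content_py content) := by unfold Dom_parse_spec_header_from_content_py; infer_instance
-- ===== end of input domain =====

-- B inverts the loop nesting: one staged reverse scan per key, stopping at the first hit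
-- (= A's last overwrite), instead of A's single forward pass probing three prefixes per
-- line (objective: alternative decomposition, same cost).

-- ===== PORT A =====
-- shared value extraction both Pythons write verbatim: line[len(key)+1:].strip().strip('"').strip("'")
def pvVal (key line : List Char) : String :=
  String.ofList (PySem.Chars.stripChars
    (PySem.Chars.stripChars
      (PySem.Chars.strip (PySem.Chars.slice line (some ((key.length : Int) + 1)) none))
      ['\"']) ['\''])

-- one iteration of A's outer loop body: skip indented lines, else probe the three key prefixes
def pvLineA (info : PySem.Dict String String) (line : List Char) : PySem.Dict String String :=
  if PySem.Chars.startswith line [' '] || PySem.Chars.startswith line ['\t'] then info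
  else
    [['i','d'], ['t','i','t','l','e'], ['s','t','a','t','u','s']].foldl
      (fun info key =>
        if PySem.Chars.startswith line (key ++ [':']) then
          info.insert (String.ofList key) (pvVal key line)
        else info) info

def parse_spec_header_from_content_py (content : String) : List (String × String) :=
  ((PySem.List.slice (PySem.Chars.splitlines content.toList) none (some 20)).foldl pvLineA
    (((PySem.Dict.empty.insert "id" "").insert "title" "").insert "status" "")).items

-- ===== PORT B =====
-- B's inner-loop test: the line is not skipped by `continue` and starts with "key:" (→ break)
def pvCond (key line : List Char) : Bool :=
  !(PySem.Chars.startswith line [' '] || PySem.Chars.startswith line ['\t']) &&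
  PySem.Chars.startswith line (key ++ [':'])

-- B's staged pass for one key: scan the window in reverse, stop at the first hit
def pvScan (key : List Char) (lines : List (List Char)) : String :=
  match lines.reverse.find? (pvCond key) with
  | none => ""
  | some line => pvVal key line

def parse_spec_header_from_content_py_alt (content : String) : List (String × String) :=
  let lines := PySem.List.slice (PySem.Chars.splitlines content.toList) none (some 20)
  (((PySem.Dict.empty.insert "id" (pvScan ['i','d'] lines)).insert "title"
      (pvScan ['t','i','t','l','e'] lines)).insert "status"
      (pvScan ['s','t','a','t','u','s'] lines)).items

-- ===== PRECONDITION & SPEC =====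
def Spec_parse_spec_header_from_content_py (content : String) (out : List (String × String)) : Prop := out = parse_spec_header_from_content_py_alt content
instance (content : String) (out : List (String × String)) : Decidable (Spec_parse_spec_header_from_content_py content out) := by unfold Spec_parse_spec_header_from_content_py; infer_instance

-- ===== CLAIM (what is proved, stated in full; the proofs are below) =====
def Claim_equal_parse_spec_header_from_content_py : Prop := ∀ (content : String), Dom_parse_spec_header_from_content_py content → Spec_parse_spec_header_from_content_py content (parse_spec_header_from_content_py content)

-- ===== LEMMAS AND PROOFS =====

-- A's forward overwrite semantics for a single key, as a fold
def pvG (key : List Char) (a : String) (lines : List (List Char)) : String :=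
  lines.foldl (fun acc line => if pvCond key line then pvVal key line else acc) a

-- A's per-line step, seen through getD at one of the three keys
theorem pvLineA_getD (d : PySem.Dict String String) (line : List Char)
    (key : List Char)
    (hk : key = ['i','d'] ∨ key = ['t','i','t','l','e'] ∨ key = ['s','t','a','t','u','s']) :
    (pvLineA d line).getD (String.ofList key) "" =
      if pvCond key line then pvVal key line else d.getD (String.ofList key) "" := by
  have eid : String.ofList ['i','d'] = "id" := rfl
  have eti : String.ofList ['t','i','t','l','e'] = "title" := rfl
  have est : String.ofList ['s','t','a','t','u','s'] = "status" := rfl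
  unfold pvLineA pvCond
  by_cases hind : (PySem.Chars.startswith line [' '] || PySem.Chars.startswith line ['\t']) = true
  · simp [hind]
  · simp only [Bool.not_eq_true] at hind
    simp only [hind, Bool.false_eq_true, if_false, Bool.not_false, Bool.true_and,
      List.foldl_cons, List.foldl_nil, eid, eti, est]
    rcases hk with rfl | rfl | rfl <;> simp only [eid, eti, est] <;>
      split_ifs <;>
      simp_all [PySem.Dict.getD_insert]

-- A's per-line step preserves the key list when the three keys are present
theorem pvLineA_keys (d : PySem.Dict String String) (line : List Char)
    (h1 : d.contains "id" = true) (h2 : d.contains "title" = true)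
    (h3 : d.contains "status" = true) :
    (pvLineA d line).keys = d.keys := by
  unfold pvLineA
  split_ifs with h
  · rfl
  · simp only [List.foldl_cons, List.foldl_nil]
    have eid : String.ofList ['i','d'] = "id" := rfl
    have eti : String.ofList ['t','i','t','l','e'] = "title" := rfl
    have est : String.ofList ['s','t','a','t','u','s'] = "status" := rfl
    simp only [eid, eti, est]
    split_ifs <;>
      simp_all [PySem.Dict.keys_insert_of_contains, PySem.Dict.contains_insert]

-- the loop invariant of A's fold: keys fixed, each key's value follows pvG
theorem pvFoldA (lines : List (List Char)) (d : PySem.Dict String String)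
    (h1 : d.contains "id" = true) (h2 : d.contains "title" = true)
    (h3 : d.contains "status" = true) :
    (lines.foldl pvLineA d).keys = d.keys ∧
    ∀ key, (key = ['i','d'] ∨ key = ['t','i','t','l','e'] ∨ key = ['s','t','a','t','u','s']) →
      (lines.foldl pvLineA d).getD (String.ofList key) "" =
        pvG key (d.getD (String.ofList key) "") lines := by
  induction lines generalizing d with
  | nil => simp [pvG]
  | cons l ls ih =>
    have hk := pvLineA_keys d l h1 h2 h3
    have cpres : ∀ s : String, d.contains s = true → (pvLineA d l).contains s = true := by
      intro s hs
      rw [PySem.Dict.contains_iff_mem_keys, hk, ← PySem.Dict.contains_iff_mem_keys]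
      exact hs
    obtain ⟨hks, hg⟩ := ih (pvLineA d l) (cpres _ h1) (cpres _ h2) (cpres _ h3)
    refine ⟨by simp only [List.foldl_cons]; rw [hks, hk], ?_⟩
    intro key hkey
    simp only [List.foldl_cons]
    rw [hg key hkey, pvLineA_getD d l key hkey]
    simp [pvG]

-- the forward fold-with-overwrite equals the reverse first-hit search
theorem pvG_eq_scan (key : List Char) (a : String) (lines : List (List Char)) :
    pvG key a lines = (match lines.reverse.find? (pvCond key) with
      | none => a
      | some line => pvVal key line) := by
  induction lines generalizing a with
  | nil => simp [pvG]
  | cons l ls ih =>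
    simp only [pvG, List.foldl_cons, List.reverse_cons, List.find?_append]
    have h := ih (if pvCond key l then pvVal key l else a)
    simp only [pvG] at h
    rw [h]
    cases hf : ls.reverse.find? (pvCond key) with
    | some m => simp
    | none => by_cases hc : pvCond key l <;> simp [List.find?, hc]

-- B's dict is literal: its items are the three pairs in key order
theorem pvAltItems (a b c : String) :
    (((PySem.Dict.empty.insert "id" a).insert "title" b).insert "status" c).items =
      [("id", a), ("title", b), ("status", c)] := rfl

-- ===== VERDICT (by name: the statement is the Claim_ definition above) =====
theorem parse_spec_header_from_content_py_spec : Claim_equal_parse_spec_header_from_content_py := by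
  intro content _
  unfold Spec_parse_spec_header_from_content_py
  unfold parse_spec_header_from_content_py parse_spec_header_from_content_py_alt
  set lines := PySem.List.slice (PySem.Chars.splitlines content.toList) none (some 20) with hl
  set d0 := ((PySem.Dict.empty.insert "id" "").insert "title" "").insert "status" "" with hd0
  obtain ⟨hks, hg⟩ := pvFoldA lines d0 (by decide) (by decide) (by decide)
  have hkeys : (lines.foldl pvLineA d0).keys = ["id", "title", "status"] := hks
  have hnd : (lines.foldl pvLineA d0).keys.Nodup := by rw [hkeys]; decide
  rw [PySem.Dict.items_eq_map_keys _ hnd "", hkeys, pvAltItems]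
  have hv : ∀ key, (key = ['i','d'] ∨ key = ['t','i','t','l','e'] ∨ key = ['s','t','a','t','u','s']) →
      (lines.foldl pvLineA d0).getD (String.ofList key) "" = pvScan key lines := by
    intro key hkey
    rw [hg key hkey]
    have : d0.getD (String.ofList key) "" = "" := by
      rcases hkey with rfl | rfl | rfl <;> decide
    rw [this, pvG_eq_scan]
    rfl
  simp only [List.map_cons, List.map_nil]
  rw [show ("id" : String) = String.ofList ['i','d'] from rfl,
      show ("title" : String) = String.ofList ['t','i','t','l','e'] from rfl,
      show ("status" : String) = String.ofList ['s','t','a','t','u','s'] from rfl]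
  rw [hv ['i','d'] (Or.inl rfl), hv ['t','i','t','l','e'] (Or.inr (Or.inl rfl)),
      hv ['s','t','a','t','u','s'] (Or.inr (Or.inr rfl))]
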